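-- pv_equiv track=rewrite | github.com/pytorch/pytorch | pytorch-env/lib/python3.12/site-packages/expecttest/__init__.py | nth_eol
-- ===== SOURCE A (Python) =====
-- def nth_eol(src: str, lineno: int) -> int:
--     """
--     Compute the ending index of the n-th line (before the newline,
--     where n is 1-indexed)
--
--     >>> nth_eol("aaa\\nbb\\nc", 2)
--     6
--     """
--     assert lineno >= 1
--     pos = -1
--     for _ in range(lineno):
--         pos = src.find("\n", pos + 1)
--         if pos == -1:
--             return len(src)
--     return pos
-- ===== SOURCE B (Python) =====
-- def nth_eol(src: str, lineno: int) -> int: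
--     assert lineno >= 1
--     parts = src.split("\n")
--     if len(parts) - 1 < lineno:
--         return len(src)
--     return sum(len(p) for p in parts[:lineno]) + (lineno - 1)
-- ===== Notes on version B (the rewrite author's own statement) =====
-- stated objective: alternative
-- what changed: Replaces the incremental find-scan loop over lineno with a single split('\n') and a closed arithmetic formula (sum of the first lineno segment lengths plus lineno-1 separators).
import Mathlib
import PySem

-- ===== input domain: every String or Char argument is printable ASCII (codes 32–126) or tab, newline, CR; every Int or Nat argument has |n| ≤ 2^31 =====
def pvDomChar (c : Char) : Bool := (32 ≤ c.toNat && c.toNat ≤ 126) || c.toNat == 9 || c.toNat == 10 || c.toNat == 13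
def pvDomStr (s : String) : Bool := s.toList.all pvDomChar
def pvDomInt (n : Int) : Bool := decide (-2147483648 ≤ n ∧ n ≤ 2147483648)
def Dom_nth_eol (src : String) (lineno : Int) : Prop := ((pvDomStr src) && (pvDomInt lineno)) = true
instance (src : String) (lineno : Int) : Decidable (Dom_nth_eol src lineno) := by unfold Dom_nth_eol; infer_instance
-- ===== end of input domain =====

-- B replaces A's incremental find-scan loop with one split('\n') plus a closed arithmetic formula (alternative decomposition, same cost).


-- ===== PORT A =====
-- A's for-loop over range(lineno) with early return, as structural recursion on the trip count.
def nthEolLoopA (src : String) : Nat → Int → Int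
  | 0, pos => pos
  | n+1, pos =>
    let p := PySem.Str.findFrom src "\n" (pos + 1) none
    if p = -1 then PySem.Str.len src else nthEolLoopA src n p

def nth_eol (src : String) (lineno : Int) : Int := nthEolLoopA src lineno.toNat (-1)

-- ===== PORT B =====
def nth_eol_alt (src : String) (lineno : Int) : Int :=
  let parts := PySem.Chars.splitOn src.toList ['\n']
  if (parts.length : Int) - 1 < lineno then PySem.Str.len src
  else ((PySem.List.slice parts none (some lineno)).map (fun p => (p.length : Int))).sum + (lineno - 1)

-- ===== PRECONDITION & SPEC =====
-- Pre_ excludes exactly lineno < 1, where A's 'assert lineno >= 1' raises AssertionError.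
def Pre_nth_eol (src : String) (lineno : Int) : Prop := 1 ≤ lineno
instance (src : String) (lineno : Int) : Decidable (Pre_nth_eol src lineno) := by unfold Pre_nth_eol; infer_instance
def pvWitness_nth_eol : String × Int := ("aaa\nbb\nc", 2)
def Spec_nth_eol (src : String) (lineno : Int) (out : Int) : Prop := out = nth_eol_alt src lineno
instance (src : String) (lineno : Int) (out : Int) : Decidable (Spec_nth_eol src lineno out) := by unfold Spec_nth_eol; infer_instance

-- ===== CLAIM (what is proved, stated in full; the proofs are below) =====
def Claim_equal_nth_eol : Prop := ∀ (src : String) (lineno : Int), Dom_nth_eol src lineno → Pre_nth_eol src lineno → Spec_nth_eol src lineno (nth_eol src lineno)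

-- ===== LEMMAS AND PROOFS =====

-- reference: position of the n-th '\n' (1-indexed) in cs, none if fewer newlines
def refNL : List Char → Nat → Option Nat
  | _, 0 => none
  | [], _+1 => none
  | c :: rest, n+1 =>
    if c = '\n' then (if n = 0 then some 0 else (refNL rest n).map (· + 1))
    else (refNL rest (n+1)).map (· + 1)

-- pure recursion equal to PySem.Chars.splitOn · ['\n']
def split1 : List Char → List (List Char)
  | [] => [[]]
  | c :: rest =>
    if c = '\n' then [] :: split1 rest
    else match split1 rest with
      | [] => [[c]]
      | s :: ss => (c :: s) :: ss

theorem split1_ne_nil (cs : List Char) : split1 cs ≠ [] := by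
  induction cs with
  | nil => simp [split1]
  | cons c rest ih =>
    simp only [split1]; split
    · simp
    · split <;> simp

theorem modifyHead_id {α : Type} (l : List α) : List.modifyHead (fun x => x) l = l := by
  cases l <;> simp

theorem splitOn_go_eq (cs : List Char) : ∀ (fuel : Nat) (cur : List Char) (acc : List (List Char)),
    cs.length ≤ fuel →
    PySem.Chars.splitOn.go ['\n'] fuel cs cur acc =
      acc.reverse ++ (split1 cs).modifyHead (cur.reverse ++ ·) := by
  induction cs with
  | nil =>
    intro fuel cur acc _
    cases fuel <;> simp [PySem.Chars.splitOn.go, split1]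
  | cons c rest ih =>
    intro fuel cur acc hlen
    obtain ⟨f, rfl⟩ : ∃ f, fuel = f + 1 := by
      cases fuel with
      | zero => simp at hlen
      | succ f => exact ⟨f, rfl⟩
    rw [PySem.Chars.splitOn.go]
    by_cases hc : c = '\n'
    · subst hc
      have hp : (['\n'].isPrefixOf ('\n' :: rest)) = true := by simp [List.isPrefixOf]
      rw [hp]
      simp only [if_true, List.length_cons, List.length_nil, List.drop_succ_cons,
        List.drop_zero, Nat.zero_add] at *
      rw [ih f [] (cur.reverse :: acc) (by omega)]
      simp [split1, modifyHead_id]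
    · have hp : (['\n'].isPrefixOf (c :: rest)) = false := by
        simp [List.isPrefixOf]; exact fun h => hc h.symm
      rw [hp]
      simp only [Bool.false_eq_true, if_false, List.length_cons] at *
      rw [ih f (c :: cur) acc (by omega)]
      simp only [split1, hc, if_false]
      rcases h : split1 rest with _ | ⟨s, ss⟩
      · exact absurd h (split1_ne_nil rest)
      · simp

theorem splitOn_eq_split1 (cs : List Char) : PySem.Chars.splitOn cs ['\n'] = split1 cs := by
  rw [PySem.Chars.splitOn, splitOn_go_eq cs (cs.length + 1) [] [] (by omega)]
  simp [modifyHead_id]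

theorem refNL_none (cs : List Char) (n : Nat) (h : refNL cs 1 = none) : refNL cs (n+1) = none := by
  induction cs generalizing n with
  | nil => simp [refNL]
  | cons c rest ih =>
    simp only [refNL] at h ⊢
    by_cases hc : c = '\n'
    · simp [hc] at h
    · simp only [hc, if_false, Option.map_eq_none_iff] at h ⊢
      exact ih n h

theorem refNL_lt_length (cs : List Char) (n j : Nat) (h : refNL cs (n+1) = some j) : j < cs.length := by
  induction cs generalizing n j with
  | nil => simp [refNL] at h
  | cons c rest ih =>
    simp only [refNL, List.length_cons] at h ⊢
    by_cases hc : c = '\n'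
    · rw [if_pos hc] at h
      rcases n with _ | m
      · simp at h
        omega
      · rw [if_neg (by omega)] at h
        rcases Option.map_eq_some_iff.mp h with ⟨t, ht, rfl⟩
        have := ih m t ht
        omega
    · rw [if_neg hc] at h
      rcases Option.map_eq_some_iff.mp h with ⟨t, ht, rfl⟩
      have := ih n t ht
      omega

theorem refNL_succ (cs : List Char) (m : Nat) :
    refNL cs (m+2) = match refNL cs 1 with
      | none => none
      | some j0 => (refNL (cs.drop (j0+1)) (m+1)).map (fun t => j0 + 1 + t) := by
  induction cs generalizing m with
  | nil => simp [refNL]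
  | cons c rest ih =>
    by_cases hc : c = '\n'
    · simp only [refNL, hc, if_true]
      cases h2 : refNL rest (m+1) <;> simp [h2, Nat.add_comm]
    · simp only [refNL, hc, if_false]
      cases h : refNL rest 1 with
      | none => simp [refNL_none rest (m+1) h]
      | some j =>
        rw [ih m, h]
        simp only [List.drop_succ_cons]
        cases h2 : refNL (rest.drop (j+1)) (m+1) with
        | none => simp [h2]
        | some t => simp [h2]; omega

theorem find_go_nl (cs : List Char) : ∀ (k : Nat),
    PySem.Chars.find.go ['\n'] cs k =
      match refNL cs 1 with
      | none => -1
      | some j => (k : Int) + j := by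
  induction cs with
  | nil => intro k; simp [PySem.Chars.find.go, refNL]
  | cons c rest ih =>
    intro k
    rw [PySem.Chars.find.go]
    by_cases hc : c = '\n'
    · subst hc
      simp [List.isPrefixOf, refNL]
    · simp only [refNL, hc, if_false]
      have h2 : (['\n'].isPrefixOf (c :: rest)) = false := by
        simp [List.isPrefixOf]; exact fun h => hc h.symm
      rw [h2]
      simp only [Bool.false_eq_true, if_false, ih (k+1)]
      cases refNL rest 1 <;> simp <;> push_cast <;> ring

theorem toList_nl : "\n".toList = ['\n'] := by decide

theorem A_loop_eq (src : String) : ∀ (n k : Nat), k ≤ src.toList.length →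
    nthEolLoopA src (n+1) ((k : Int) - 1) =
      match refNL (src.toList.drop k) (n+1) with
      | none => (src.toList.length : Int)
      | some j => (k : Int) + j := by
  intro n
  induction n with
  | zero =>
    intro k hk
    rw [nthEolLoopA]
    simp only [PySem.Str.findFrom_eq, PySem.Str.len_eq, toList_nl]
    rw [show (k:Int) - 1 + 1 = (k:Int) by ring, PySem.Chars.findFrom_natCast _ _ k hk,
        show PySem.Chars.find (src.toList.drop k) ['\n'] =
          PySem.Chars.find.go ['\n'] (src.toList.drop k) 0 from rfl, find_go_nl]
    cases h : refNL (src.toList.drop k) 1 with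
    | none => simp
    | some j =>
      simp only [Nat.cast_zero, zero_add]
      rw [if_neg (show ¬ ((j:Int) = -1) by omega),
          if_neg (show ¬ ((k:Int) + (j:Int) = -1) by omega), nthEolLoopA]
  | succ m ih =>
    intro k hk
    rw [nthEolLoopA]
    simp only [PySem.Str.findFrom_eq, PySem.Str.len_eq, toList_nl]
    rw [show (k:Int) - 1 + 1 = (k:Int) by ring, PySem.Chars.findFrom_natCast _ _ k hk,
        show PySem.Chars.find (src.toList.drop k) ['\n'] =
          PySem.Chars.find.go ['\n'] (src.toList.drop k) 0 from rfl, find_go_nl]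
    cases h : refNL (src.toList.drop k) 1 with
    | none =>
      rw [refNL_none _ _ h]
      simp
    | some j =>
      simp only [Nat.cast_zero, zero_add]
      rw [if_neg (show ¬ ((j:Int) = -1) by omega),
          if_neg (show ¬ ((k:Int) + (j:Int) = -1) by omega)]
      have hjlt : j < (src.toList.drop k).length := refNL_lt_length _ 0 j h
      have hk' : k + j + 1 ≤ src.toList.length := by
        rw [List.length_drop] at hjlt; omega
      have hsucc : refNL (src.toList.drop k) (m+1+1) =
          (refNL (src.toList.drop (k+j+1)) (m+1)).map (fun t => j + 1 + t) := by
        rw [show m+1+1 = m+2 from rfl, refNL_succ, h]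
        simp only [List.drop_drop]
        rw [show k+(j+1) = k+j+1 from rfl]
      rw [show (k:Int) + (j:Int) = ((k + j + 1 : Nat) : Int) - 1 by push_cast; ring,
          ih (k + j + 1) hk', hsucc]
      cases h2 : refNL (src.toList.drop (k + j + 1)) (m+1) with
      | none => simp
      | some t => simp; push_cast; ring

theorem B_eq (cs : List Char) : ∀ (n : Nat),
    (if ((split1 cs).length : Int) - 1 < (n:Int)+1 then (cs.length : Int)
     else (((split1 cs).take (n+1)).map (fun p => (p.length : Int))).sum + (n:Int)) =
      match refNL cs (n+1) with
      | none => (cs.length : Int)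
      | some j => (j : Int) := by
  induction cs with
  | nil => intro n; simp [split1, refNL]
  | cons c rest ih =>
    intro n
    have hne := split1_ne_nil rest
    have hpos : 1 ≤ (split1 rest).length := List.length_pos_iff.mpr hne
    by_cases hc : c = '\n'
    · subst hc
      have hsplit : split1 ('\n'::rest) = [] :: split1 rest := by simp [split1]
      rw [hsplit]
      rcases n with _ | m
      · have hr : refNL ('\n'::rest) 1 = some 0 := by simp [refNL]
        rw [hr, if_neg (by simp; push_cast; omega)]
        simp
      · have hr : refNL ('\n'::rest) (m+2) = (refNL rest (m+1)).map (· + 1) := by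
          simp [refNL]
        rw [hr]
        have H := ih m
        simp only [List.take_succ_cons, List.map_cons, List.sum_cons, List.length_cons]
        rcases h2 : refNL rest (m+1) with _ | j <;> rw [h2] at H <;>
          simp only [Option.map_some, Option.map_none] <;>
          split_ifs at H ⊢ with h3 h4 <;> push_cast [List.length_nil] at * <;> linarith
    · have H := ih n
      rcases h : split1 rest with _ | ⟨s, ss⟩
      · exact absurd h hne
      rw [h] at H hpos
      have hsplit : split1 (c::rest) = (c::s)::ss := by simp [split1, hc, h]
      have hr : refNL (c::rest) (n+1) = (refNL rest (n+1)).map (· + 1) := by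
        simp [refNL, hc]
      rw [hsplit, hr]
      simp only [List.take_succ_cons, List.map_cons, List.sum_cons, List.length_cons] at H ⊢
      rcases h2 : refNL rest (n+1) with _ | j <;> rw [h2] at H <;>
        simp only [Option.map_some, Option.map_none] <;>
        split_ifs at H ⊢ with h3 h4 <;> push_cast [List.length_nil] at * <;> linarith

-- ===== VERDICT (by name: the statement is the Claim_ definition above) =====
theorem nth_eol_spec : Claim_equal_nth_eol := by
  intro src lineno _ hpre
  unfold Spec_nth_eol
  simp only [nth_eol, nth_eol_alt]
  have h1 : 1 ≤ lineno := hpre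
  obtain ⟨n, hn⟩ : ∃ n : Nat, lineno = (n : Int) + 1 := by
    refine ⟨(lineno - 1).toNat, ?_⟩
    omega
  subst hn
  have htn : ((n:Int)+1).toNat = n + 1 := by omega
  rw [htn]
  have hA := A_loop_eq src n 0 (Nat.zero_le _)
  simp only [Nat.cast_zero, zero_sub, List.drop_zero, zero_add] at hA
  rw [hA, splitOn_eq_split1, PySem.Str.len_eq]
  rw [PySem.List.slice_to _ (show (0:Int) ≤ (n:Int)+1 by omega), htn,
      show (n:Int) + 1 - 1 = (n:Int) by ring]
  exact (B_eq src.toList n).symm
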